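-- pv_equiv track=rewrite | github.com/ch1nhpd/strix | strix/tools/assessment/assessment_validation_actions.py | _looks_like_jwt
-- ===== SOURCE A (Python) =====
-- def _looks_like_jwt(value: str | None) -> bool:
--     candidate = str(value or "").strip()
--     if candidate.count(".") != 2:
--         return False
--     return all(
--         part and all(char.isalnum() or char in {"-", "_"} for char in part)
--         for part in candidate.split(".")
--     )
-- ===== SOURCE B (Python) =====
-- def _looks_like_jwt(value):
--     candidate = str(value or "").strip()
--     if candidate.count(".") != 2:
--         return False
--     if candidate.startswith(".") or candidate.endswith(".") or ".." in candidate: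
--         return False
--     return all(c.isalnum() or c in {"-", "_", "."} for c in candidate)
-- ===== Notes on version B (the rewrite author's own statement) =====
-- stated objective: alternative
-- what changed: Instead of splitting the candidate on the dot separator and validating each part separately, B validates the whole string in one pass: positional checks (no leading or trailing dot, no two adjacent dots) enforce the nonempty-parts requirement and a single character scan with the dot added to the allowed set replaces the per-part scans.
import Mathlib
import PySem

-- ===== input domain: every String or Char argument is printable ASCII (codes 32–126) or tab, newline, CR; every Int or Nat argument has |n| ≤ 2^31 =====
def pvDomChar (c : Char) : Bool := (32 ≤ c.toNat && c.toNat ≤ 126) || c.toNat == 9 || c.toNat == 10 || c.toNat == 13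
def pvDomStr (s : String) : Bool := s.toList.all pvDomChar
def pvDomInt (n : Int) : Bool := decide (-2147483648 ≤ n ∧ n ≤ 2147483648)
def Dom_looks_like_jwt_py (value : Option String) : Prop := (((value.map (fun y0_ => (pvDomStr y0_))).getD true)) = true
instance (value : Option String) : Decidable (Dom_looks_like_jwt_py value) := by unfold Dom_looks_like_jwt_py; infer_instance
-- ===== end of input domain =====

-- B replaces A's split-into-parts validation by a single structural pass over the whole string
-- (no leading/trailing dot, no '..', one character scan with '.' allowed): an alternative decomposition, same cost.


-- ===== PORT A =====
def looks_like_jwt_py (value : Option String) : Bool :=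
  -- candidate = str(value or "").strip()   ('value or ""' is "" for None and for "", i.e. getD "")
  let candidate := PySem.Str.strip (value.getD "")
  -- if candidate.count(".") != 2: return False
  if PySem.Str.count candidate "." ≠ 2 then false
  else
    -- all(part and all(char.isalnum() or char in {"-","_"} for char in part) for part in candidate.split("."))
    (PySem.Chars.splitOn candidate.toList ['.']).all
      (fun part => !part.isEmpty && part.all (fun c => PySem.Chars.isalnum c || c == '-' || c == '_'))

-- ===== PORT B =====
def looks_like_jwt_py_alt (value : Option String) : Bool :=
  let candidate := PySem.Str.strip (value.getD "")
  if PySem.Str.count candidate "." ≠ 2 then false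
  else if PySem.Str.startswith candidate "." || PySem.Str.endswith candidate "." ||
          PySem.Str.isIn ".." candidate then false
  else candidate.toList.all (fun c => PySem.Chars.isalnum c || c == '-' || c == '_' || c == '.')

-- ===== PRECONDITION & SPEC =====
def Spec_looks_like_jwt_py (value : Option String) (out : Bool) : Prop := out = looks_like_jwt_py_alt value
instance (value : Option String) (out : Bool) : Decidable (Spec_looks_like_jwt_py value out) := by unfold Spec_looks_like_jwt_py; infer_instance

-- ===== CLAIM (what is proved, stated in full; the proofs are below) =====
def Claim_equal_looks_like_jwt_py : Prop := ∀ (value : Option String), Dom_looks_like_jwt_py value → Spec_looks_like_jwt_py value (looks_like_jwt_py value)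

-- ===== LEMMAS AND PROOFS =====

-- reference recursive form of Python's split on a single-character separator
def pvSplit (d : Char) : List Char → List (List Char)
  | [] => [[]]
  | c :: rest => if c = d then [] :: pvSplit d rest else (pvSplit d rest).modifyHead (c :: ·)

-- DFA over the string: `start` = we are at the beginning of a part (part so far empty)
def pvScan (d : Char) (ok : Char → Bool) : Bool → List Char → Bool
  | start, [] => !start
  | start, c :: rest =>
      if c = d then !start && pvScan d ok true rest else ok c && pvScan d ok false rest

lemma modifyHead_fun_id {α : Type} (l : List α) : List.modifyHead (fun x => x) l = l := by
  cases l <;> simp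

lemma pvSplit_ne_nil (d : Char) (l : List Char) : pvSplit d l ≠ [] := by
  cases l with
  | nil => simp [pvSplit]
  | cons c rest =>
    simp only [pvSplit]
    split
    · simp
    · intro h
      have := pvSplit_ne_nil d rest
      cases hh : pvSplit d rest with
      | nil => exact this hh
      | cons p ps => rw [hh] at h; simp at h

lemma splitOn_go_eq (d : Char) (l : List Char) : ∀ (fuel : Nat) (cur : List Char) (acc : List (List Char)),
    l.length ≤ fuel →
    PySem.Chars.splitOn.go [d] fuel l cur acc
      = acc.reverse ++ (pvSplit d l).modifyHead (cur.reverse ++ ·) := by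
  induction l with
  | nil =>
    intro fuel cur acc _
    cases fuel <;> simp [PySem.Chars.splitOn.go, pvSplit]
  | cons c rest ih =>
    intro fuel cur acc hfuel
    cases fuel with
    | zero => simp at hfuel
    | succ f =>
      have hf : rest.length ≤ f := by simpa using hfuel
      by_cases hcd : c = d
      · subst hcd
        have hpre : [c].isPrefixOf (c :: rest) = true := by simp [List.isPrefixOf]
        simp only [PySem.Chars.splitOn.go, hpre, if_pos]
        have hdrop : List.drop [c].length (c :: rest) = rest := rfl
        rw [hdrop, ih f [] (cur.reverse :: acc) hf]
        simp [pvSplit, modifyHead_fun_id]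
      · have hpre : [d].isPrefixOf (c :: rest) = false := by
          simp [List.isPrefixOf]
          exact fun h => absurd h.symm hcd
        simp only [PySem.Chars.splitOn.go, hpre]
        rw [ih f (c :: cur) acc hf]
        simp only [pvSplit, if_neg hcd]
        cases hh : pvSplit d rest with
        | nil => exact absurd hh (pvSplit_ne_nil d rest)
        | cons p ps => simp

lemma splitOn_eq_pvSplit (d : Char) (l : List Char) :
    PySem.Chars.splitOn l [d] = pvSplit d l := by
  have := splitOn_go_eq d l (l.length + 1) [] [] (by omega)
  simpa [PySem.Chars.splitOn, modifyHead_fun_id] using this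

-- relaxed check: head part's chars must be ok but it may be empty; tail parts fully checked
def pvRelaxed (ok : Char → Bool) : List (List Char) → Bool
  | [] => true
  | p :: qs => p.all ok && qs.all (fun q => !q.isEmpty && q.all ok)

lemma all_pvSplit_eq_scan (d : Char) (ok : Char → Bool) (l : List Char) :
    ((pvSplit d l).all (fun p => !p.isEmpty && p.all ok) = pvScan d ok true l)
    ∧ (pvRelaxed ok (pvSplit d l) = pvScan d ok false l) := by
  induction l with
  | nil => simp [pvSplit, pvScan, pvRelaxed]
  | cons c rest ih =>
    by_cases hcd : c = d
    · subst hcd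
      constructor
      · simp [pvSplit, pvScan]
      · simp only [pvSplit, pvRelaxed, pvScan, Bool.not_false, Bool.true_and]
        exact ih.1
    · cases hh : pvSplit d rest with
      | nil => exact absurd hh (pvSplit_ne_nil d rest)
      | cons p ps =>
        have h2 := ih.2
        rw [hh] at h2
        constructor
        · simp only [pvSplit, hh, List.modifyHead, List.all_cons, pvScan, if_neg hcd]
          rw [← h2]
          simp [pvRelaxed, Bool.and_assoc]
        · simp only [pvSplit, hh, List.modifyHead, pvRelaxed, pvScan, if_neg hcd, List.all_cons]
          rw [← h2]
          simp [pvRelaxed, Bool.and_assoc]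

lemma scan_true_eq (d : Char) (ok : Char → Bool) (l : List Char) (hl : l ≠ []) :
    pvScan d ok true l = (!PySem.Chars.startswith l [d] && pvScan d ok false l) := by
  cases l with
  | nil => exact absurd rfl hl
  | cons c rest =>
    by_cases hcd : c = d
    · subst hcd
      simp [pvScan, PySem.Chars.startswith, List.isPrefixOf]
    · have : PySem.Chars.startswith (c :: rest) [d] = false := by
        simp [PySem.Chars.startswith, List.isPrefixOf]
        exact fun h => absurd h.symm hcd
      simp [pvScan, if_neg hcd, this]

lemma endswith_cons (d c : Char) (rest : List Char) (h : rest ≠ []) :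
    PySem.Chars.endswith (c :: rest) [d] = PySem.Chars.endswith rest [d] := by
  rw [Bool.eq_iff_iff]
  rw [PySem.Chars.endswith_iff, PySem.Chars.endswith_iff]
  constructor
  · intro hs
    rcases List.suffix_cons_iff.mp hs with h1 | h1
    · exfalso
      injection h1 with h1a h1b
      exact h h1b.symm
    · exact h1
  · intro hs
    exact hs.trans (List.suffix_cons c rest)

lemma isIn_cons (d c : Char) (rest : List Char) :
    PySem.Chars.isIn [d, d] (c :: rest)
      = ((c == d && PySem.Chars.startswith rest [d]) || PySem.Chars.isIn [d, d] rest) := by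
  rw [Bool.eq_iff_iff]
  simp only [Bool.or_eq_true, Bool.and_eq_true, beq_iff_eq]
  rw [PySem.Chars.isIn_iff_infix, PySem.Chars.isIn_iff_infix, PySem.Chars.startswith_iff]
  rw [List.infix_cons_iff]
  constructor
  · rintro (h1 | h1)
    · left
      rcases h1 with ⟨t, ht⟩
      simp at ht
      exact ⟨ht.1.symm ▸ rfl, ⟨t, ht.2⟩⟩
    · right; exact h1
  · rintro (⟨h1, t, ht⟩ | h1)
    · left
      exact ⟨t, by simp [h1, ht]⟩
    · right; exact h1

lemma scan_false_eq (d : Char) (ok : Char → Bool) (l : List Char) :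
    pvScan d ok false l
      = (!PySem.Chars.endswith l [d] && !PySem.Chars.isIn [d, d] l
          && l.all (fun c => ok c || c == d)) := by
  induction l with
  | nil =>
    have h0 : PySem.Chars.isIn [d, d] ([] : List Char) = false := by
      rw [PySem.Chars.isIn_eq_false_iff]; simp
    simp [pvScan, PySem.Chars.endswith, h0]
  | cons c rest ih =>
    by_cases hcd : c = d
    · subst hcd
      cases rest with
      | nil =>
        simp [pvScan, PySem.Chars.endswith, List.isSuffixOf, List.isPrefixOf]
      | cons c' rest' =>
        have hne : (c' :: rest' : List Char) ≠ [] := by simp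
        rw [show pvScan c ok false (c :: c' :: rest') = pvScan c ok true (c' :: rest') by
              simp [pvScan]]
        rw [endswith_cons c c (c' :: rest') hne, isIn_cons c c (c' :: rest')]
        rw [scan_true_eq c ok (c' :: rest') hne, ih]
        simp only [List.all_cons, beq_self_eq_true, Bool.or_true, Bool.true_and]
        cases PySem.Chars.startswith (c' :: rest') [c] <;>
          cases PySem.Chars.endswith (c' :: rest') [c] <;>
          cases PySem.Chars.isIn [c, c] (c' :: rest') <;> simp
    · have hbd : (c == d) = false := by simp [hcd]
      cases rest with
      | nil =>
        have h0 : PySem.Chars.isIn [d, d] [c] = false := by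
          rw [PySem.Chars.isIn_eq_false_iff]
          intro hinf
          have := hinf.length_le
          simp at this
        have h1 : PySem.Chars.isIn [d, d] ([] : List Char) = false := by
          rw [PySem.Chars.isIn_eq_false_iff]; simp
        have h2 : PySem.Chars.endswith [c] [d] = false := by
          simp [PySem.Chars.endswith, List.isSuffixOf, List.isPrefixOf]
          exact fun h => absurd h.symm hcd
        simp [pvScan, if_neg hcd, h0, h2, hbd]
      | cons c' rest' =>
        rw [show pvScan d ok false (c :: c' :: rest') = (ok c && pvScan d ok false (c' :: rest'))
              from by simp [pvScan, if_neg hcd]]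
        rw [endswith_cons d c (c' :: rest') (by simp), isIn_cons d c (c' :: rest'), ih, hbd]
        simp only [Bool.false_and, Bool.false_or, List.all_cons, hbd, Bool.or_false]
        cases ok c <;> cases PySem.Chars.endswith (c' :: rest') [d] <;>
          cases PySem.Chars.isIn [d, d] (c' :: rest') <;> simp

-- ===== VERDICT (by name: the statement is the Claim_ definition above) =====
theorem looks_like_jwt_py_spec : Claim_equal_looks_like_jwt_py := by
  intro value _
  unfold Spec_looks_like_jwt_py looks_like_jwt_py looks_like_jwt_py_alt
  set candidate := PySem.Str.strip (value.getD "") with hc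
  by_cases hcount : PySem.Str.count candidate "." ≠ 2
  · rw [if_pos hcount, if_pos hcount]
  · rw [if_neg hcount, if_neg hcount]
    have hcount2 : PySem.Chars.count candidate.toList ['.'] = 2 := by
      have := not_not.mp hcount
      simpa using this
    set l := candidate.toList with hl
    have hlne : l ≠ [] := by
      intro h
      rw [h] at hcount2
      simp only [PySem.Chars.count] at hcount2
      exact absurd hcount2 (by decide)
    rw [splitOn_eq_pvSplit]
    rw [(all_pvSplit_eq_scan '.' (fun c => PySem.Chars.isalnum c || c == '-' || c == '_') l).1]
    rw [scan_true_eq _ _ l hlne, scan_false_eq]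
    have hsw : PySem.Str.startswith candidate "." = PySem.Chars.startswith l ['.'] := by
      simp [hl]
    have hew : PySem.Str.endswith candidate "." = PySem.Chars.endswith l ['.'] := by
      simp [hl]
    have hin : PySem.Str.isIn ".." candidate = PySem.Chars.isIn ['.', '.'] l := by
      simp [hl]
    rw [hsw, hew, hin]
    cases PySem.Chars.startswith l ['.'] <;>
      cases PySem.Chars.endswith l ['.'] <;>
      cases PySem.Chars.isIn ['.', '.'] l <;> simp
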